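-- pv_equiv track=rewrite | github.com/zhong950419/Leetcode | 778. Swim in Rising Water.py | bfs
-- ===== SOURCE A (Python) =====
-- def bfs(grid, limit):
--     if grid[0][0] > limit: # limit是限制的深度 如果可以通过则证明有路径，如果不能通过则没有
--         return False
--     width = len(grid)
--     q = [(0,0)]
--     visit = set(q)
--     while(q):
--         x, y = q.pop(0) # bfs标准套路，用一个queue来储存可能的选择
--         for dx, dy in zip((1,0,-1,0),(0,1,0,-1)): #判断可能的4个方向
--             current_x = dx + x
--             current_y = dy + y
--             if (current_x < 0 or current_x >= width or current_y < 0 or current_y >= width or \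
--                (current_x, current_y) in visit or grid[current_x][current_y] > limit):
--                 continue
--             visit.add((current_x, current_y)) #判断所有可到达的路径 把所有的可能性入列
--             q.append((current_x,current_y))
--
--     return (width-1,width-1) in visit #待所有的可能性被选择之后，看是不是能到达右下角
-- ===== SOURCE B (Python) =====
-- def bfs(grid, limit):
--     if grid[0][0] > limit:
--         return False
--     n = len(grid)
--     reach = [[x == 0 and y == 0 for y in range(n)] for x in range(n)]
--     for _ in range(n * n):
--         new = [[reach[x][y] or (grid[x][y] <= limit and
--                 ((x > 0 and reach[x - 1][y]) or (x + 1 < n and reach[x + 1][y]) or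
--                  (y > 0 and reach[x][y - 1]) or (y + 1 < n and reach[x][y + 1])))
--                 for y in range(n)] for x in range(n)]
--         if new == reach:
--             break
--         reach = new
--     return reach[n - 1][n - 1]
-- ===== Notes on version B (the rewrite author's own statement) =====
-- stated objective: alternative
-- what changed: Replaces the queue-based BFS with a visited set by a round-based fixed-point iteration: each round recomputes the whole reachability grid from the previous round (a cell becomes reachable if it is within limit and adjacent to a reachable cell), stopping when a round changes nothing; no queue, no set, no per-cell mutation.
-- outside the precondition, e.g. on bfs([[0, 9], [9]], 5): A returns False, B raises IndexError; on bfs([[0, 0], [0]], 5): A raises IndexError, B raises IndexError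
import Mathlib
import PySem

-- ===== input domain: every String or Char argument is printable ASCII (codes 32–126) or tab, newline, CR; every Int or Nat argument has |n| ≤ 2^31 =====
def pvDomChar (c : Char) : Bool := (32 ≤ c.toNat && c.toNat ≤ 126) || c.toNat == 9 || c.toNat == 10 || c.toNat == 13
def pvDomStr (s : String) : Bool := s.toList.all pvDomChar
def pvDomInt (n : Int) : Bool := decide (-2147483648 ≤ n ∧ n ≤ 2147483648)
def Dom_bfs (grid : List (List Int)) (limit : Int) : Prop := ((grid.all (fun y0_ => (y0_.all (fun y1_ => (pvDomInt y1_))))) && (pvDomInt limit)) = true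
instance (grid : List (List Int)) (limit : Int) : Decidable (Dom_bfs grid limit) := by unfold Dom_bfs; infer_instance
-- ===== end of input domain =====

-- B replaces A's queue-based BFS by a round-based fixed-point iteration over the whole grid
-- (stop when a round changes nothing); alternative decomposition, not claimed faster.

-- ===== PORT A =====
-- grid[x][y]: total form of the Python indexing; exact wherever the indices are
-- nonnegative and in range, which the bounds checks plus Pre_bfs guarantee.
def pvAt (grid : List (List Int)) (x y : Int) : Int :=
  PySem.List.pyGetD (PySem.List.pyGetD grid x []) y 0

-- zip((1,0,-1,0),(0,1,0,-1))
def pvDirs : List (Int × Int) := [(1, 0), (0, 1), (-1, 0), (0, -1)]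

-- body of the inner `for dx, dy in zip(...)` loop, acting on the (q, visit) state
def bfsRelax (grid : List (List Int)) (limit w : Int) (c : Int × Int)
    (acc : List (Int × Int) × PySem.Set (Int × Int)) (d : Int × Int) :
    List (Int × Int) × PySem.Set (Int × Int) :=
  if d.1 + c.1 < 0 ∨ w ≤ d.1 + c.1 ∨ d.2 + c.2 < 0 ∨ w ≤ d.2 + c.2 ∨
      (d.1 + c.1, d.2 + c.2) ∈ acc.2 ∨ limit < pvAt grid (d.1 + c.1) (d.2 + c.2) then acc
  else (acc.1 ++ [(d.1 + c.1, d.2 + c.2)], PySem.Set.add acc.2 (d.1 + c.1, d.2 + c.2))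

-- the `while q:` loop; the fuel 2*n*n+1 is only a totality device, proved sufficient below
def bfsLoop (grid : List (List Int)) (limit w : Int) :
    Nat → List (Int × Int) → PySem.Set (Int × Int) → PySem.Set (Int × Int)
  | 0, _, visit => visit
  | _ + 1, [], visit => visit
  | fuel + 1, c :: q, visit =>
    bfsLoop grid limit w fuel (pvDirs.foldl (bfsRelax grid limit w c) (q, visit)).1
      (pvDirs.foldl (bfsRelax grid limit w c) (q, visit)).2

def bfs (grid : List (List Int)) (limit : Int) : Bool :=
  if limit < pvAt grid 0 0 then false
  else
    decide ((((grid.length : Int)) - 1, ((grid.length : Int)) - 1) ∈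
      bfsLoop grid limit (grid.length : Int) (2 * grid.length * grid.length + 1) [(0, 0)]
        (PySem.Set.ofList [((0 : Int), (0 : Int))]))

-- ===== PORT B =====
-- reach[x][y]: total form of the indexing in Source B (all its accesses are in range under Pre_bfs)
def pvRG (r : List (List Bool)) (x y : Int) : Bool :=
  PySem.List.pyGetD (PySem.List.pyGetD r x []) y false

-- [[x == 0 and y == 0 for y in range(n)] for x in range(n)]
def bInit (n : Int) : List (List Bool) :=
  (PySem.List.pyRange 0 n 1).map fun x =>
    (PySem.List.pyRange 0 n 1).map fun y => x == 0 && y == 0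

-- the `new = [[ ... ]]` comprehension of Source B
def bStep (grid : List (List Int)) (limit n : Int) (reach : List (List Bool)) :
    List (List Bool) :=
  (PySem.List.pyRange 0 n 1).map fun x =>
    (PySem.List.pyRange 0 n 1).map fun y =>
      pvRG reach x y ||
        (decide (pvAt grid x y ≤ limit) &&
          ((decide (0 < x) && pvRG reach (x - 1) y) ||
           (decide (x + 1 < n) && pvRG reach (x + 1) y) ||
           (decide (0 < y) && pvRG reach x (y - 1)) ||
           (decide (y + 1 < n) && pvRG reach x (y + 1))))

-- the `for _ in range(n*n): ... if new == reach: break` loop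
def bLoop (grid : List (List Int)) (limit n : Int) :
    Nat → List (List Bool) → List (List Bool)
  | 0, reach => reach
  | k + 1, reach =>
    if bStep grid limit n reach = reach then reach
    else bLoop grid limit n k (bStep grid limit n reach)

def bfs_alt (grid : List (List Int)) (limit : Int) : Bool :=
  if limit < pvAt grid 0 0 then false
  else
    pvRG (bLoop grid limit (grid.length : Int) (grid.length * grid.length) (bInit (grid.length : Int)))
      ((grid.length : Int) - 1) ((grid.length : Int) - 1)

-- ===== PRECONDITION & SPEC =====
-- Pre_ excludes the empty grid, an empty first row, and ragged grids (some row shorter than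
-- len(grid)) that pass the initial guard: there A raises IndexError whenever its search inspects
-- a missing cell, and where it happens to return anyway the value is an accident of which cells
-- the traversal touches. Grids rejected by the guard grid[0][0] > limit are kept: both programs
-- return False there without looking at any other cell.
def Pre_bfs (grid : List (List Int)) (limit : Int) : Prop :=
  grid ≠ [] ∧ grid.headD [] ≠ [] ∧
  (limit < (grid.headD []).headD 0 ∨ ∀ row ∈ grid, grid.length ≤ row.length)
instance (grid : List (List Int)) (limit : Int) : Decidable (Pre_bfs grid limit) := by
  unfold Pre_bfs; infer_instance

def pvWitness_bfs : List (List Int) × Int := ([[0]], 0)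

def Spec_bfs (grid : List (List Int)) (limit : Int) (out : Bool) : Prop := out = bfs_alt grid limit
instance (grid : List (List Int)) (limit : Int) (out : Bool) : Decidable (Spec_bfs grid limit out) := by
  unfold Spec_bfs; infer_instance

-- ===== CLAIM (what is proved, stated in full; the proofs are below) =====
def Claim_equal_bfs : Prop := ∀ (grid : List (List Int)) (limit : Int), Dom_bfs grid limit → Pre_bfs grid limit → Spec_bfs grid limit (bfs grid limit)

-- ===== LEMMAS AND PROOFS =====

-- the common specification: cells reachable from (0,0) within k rounds through cells ≤ limit
def reachB (grid : List (List Int)) (limit w : Int) : Nat → Int → Int → Bool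
  | 0, x, y => x == 0 && y == 0
  | k + 1, x, y =>
    reachB grid limit w k x y ||
      (decide (0 ≤ x ∧ x < w ∧ 0 ≤ y ∧ y < w ∧ pvAt grid x y ≤ limit) &&
        (reachB grid limit w k (x - 1) y || reachB grid limit w k (x + 1) y ||
         reachB grid limit w k x (y - 1) || reachB grid limit w k x (y + 1)))

def ReachP (grid : List (List Int)) (limit w : Int) (c : Int × Int) : Prop :=
  ∃ k, reachB grid limit w k c.1 c.2 = true

def goodZ (grid : List (List Int)) (limit w : Int) (c : Int × Int) : Prop :=
  0 ≤ c.1 ∧ c.1 < w ∧ 0 ≤ c.2 ∧ c.2 < w ∧ pvAt grid c.1 c.2 ≤ limit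

-- basic facts about reachB
lemma reachB_ir (grid : List (List Int)) (limit w : Int) (hw : 0 < w) :
    ∀ (k : Nat) (x y : Int), reachB grid limit w k x y = true →
      0 ≤ x ∧ x < w ∧ 0 ≤ y ∧ y < w := by
  intro k
  induction k with
  | zero =>
    intro x y h
    simp only [reachB, Bool.and_eq_true, beq_iff_eq] at h
    obtain ⟨hx, hy⟩ := h
    subst hx; subst hy
    exact ⟨le_refl 0, hw, le_refl 0, hw⟩
  | succ k ih =>
    intro x y h
    simp only [reachB, Bool.or_eq_true, Bool.and_eq_true, decide_eq_true_eq] at h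
    rcases h with h | ⟨⟨h1, h2, h3, h4, _⟩, _⟩
    · exact ih x y h
    · exact ⟨h1, h2, h3, h4⟩

lemma reachB_mono (grid : List (List Int)) (limit w : Int) {j m : Nat} (h : j ≤ m)
    {x y : Int} (hr : reachB grid limit w j x y = true) : reachB grid limit w m x y = true := by
  obtain ⟨d, rfl⟩ := Nat.exists_eq_add_of_le h
  induction d with
  | zero => exact hr
  | succ d ih =>
    show reachB grid limit w ((j + d) + 1) x y = true
    simp only [reachB, Bool.or_eq_true]
    exact Or.inl (ih (Nat.le_add_right j d))

lemma reachB_fix (grid : List (List Int)) (limit w : Int) {j : Nat}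
    (hfix : ∀ x y, reachB grid limit w (j + 1) x y = reachB grid limit w j x y) :
    ∀ (m : Nat) (x y : Int), reachB grid limit w (j + m) x y = reachB grid limit w j x y := by
  intro m
  induction m with
  | zero => intro x y; rfl
  | succ m ih =>
    intro x y
    show reachB grid limit w ((j + m) + 1) x y = _
    simp only [reachB, ih]
    have h := hfix x y
    simp only [reachB] at h
    exact h

-- stabilisation: everything ever reachable is reachable within n*n rounds
lemma exists_stab (grid : List (List Int)) (limit : Int) (n : Nat) (hn : 0 < n) :
    ∃ j ≤ n * n, ∀ x y, reachB grid limit (n : Int) (j + 1) x y = reachB grid limit (n : Int) j x y := by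
  have hw : (0 : Int) < (n : Int) := by exact_mod_cast hn
  set w : Int := (n : Int) with hwdef
  set SB : Finset (Int × Int) := Finset.Icc (0 : Int) (w - 1) ×ˢ Finset.Icc (0 : Int) (w - 1) with hSB
  have hmemSB : ∀ x y : Int, 0 ≤ x → x < w → 0 ≤ y → y < w → ((x, y) : Int × Int) ∈ SB := by
    intro x y h1 h2 h3 h4
    simp only [hSB, Finset.mem_product, Finset.mem_Icc]
    omega
  have hcardSB : SB.card = n * n := by
    simp only [hSB, Finset.card_product, Int.card_Icc]
    have : ((w - 1 + 1 - 0).toNat) = n := by omega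
    rw [this]
  set SF : Nat → Finset (Int × Int) :=
    fun k => SB.filter (fun c => reachB grid limit w k c.1 c.2 = true) with hSF
  have hSFmono : ∀ k, SF k ⊆ SF (k + 1) := by
    intro k c hc
    simp only [hSF, Finset.mem_filter] at hc ⊢
    exact ⟨hc.1, reachB_mono grid limit w (Nat.le_succ k) hc.2⟩
  by_contra hcon
  push_neg at hcon
  have key : ∀ m, m ≤ n * n + 1 → m + 1 ≤ (SF m).card := by
    intro m
    induction m with
    | zero =>
      intro _
      have h0 : ((0, 0) : Int × Int) ∈ SF 0 := by
        simp only [hSF, Finset.mem_filter]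
        exact ⟨hmemSB 0 0 (le_refl 0) hw (le_refl 0) hw, rfl⟩
      exact Finset.card_pos.mpr ⟨_, h0⟩
    | succ m ih =>
      intro hm
      obtain ⟨x, y, hxy⟩ := hcon m (by omega)
      have hm0 : reachB grid limit w m x y = false := by
        cases h2 : reachB grid limit w m x y with
        | true =>
          exact absurd ((reachB_mono grid limit w (Nat.le_succ m) h2).trans h2.symm) hxy
        | false => rfl
      have hm1 : reachB grid limit w (m + 1) x y = true := by
        cases h1 : reachB grid limit w (m + 1) x y with
        | true => rfl
        | false => exact absurd (h1.trans hm0.symm) hxy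
      have hss : SF m ⊂ SF (m + 1) := by
        refine Finset.ssubset_iff_of_subset (hSFmono m) |>.mpr ?_
        refine ⟨(x, y), ?_, ?_⟩
        · simp only [hSF, Finset.mem_filter]
          obtain ⟨b1, b2, b3, b4⟩ := reachB_ir grid limit w hw (m + 1) x y hm1
          exact ⟨hmemSB x y b1 b2 b3 b4, hm1⟩
        · simp only [hSF, Finset.mem_filter]
          intro ⟨_, hh⟩
          rw [hm0] at hh
          exact Bool.false_ne_true hh
      have := Finset.card_lt_card hss
      have := ih (by omega)
      omega
  have h1 := key (n * n + 1) (le_refl _)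
  have h2 : (SF (n * n + 1)).card ≤ SB.card := Finset.card_filter_le _ _
  omega

lemma reach_to_N (grid : List (List Int)) (limit : Int) (n : Nat) (hn : 0 < n)
    (c : Int × Int) (h : ReachP grid limit (n : Int) c) :
    reachB grid limit (n : Int) (n * n) c.1 c.2 = true := by
  obtain ⟨k, hk⟩ := h
  obtain ⟨j, hj, hfix⟩ := exists_stab grid limit n hn
  have hk' : reachB grid limit (n : Int) (j + k) c.1 c.2 = true :=
    reachB_mono grid limit (n : Int) (Nat.le_add_left k j) hk
  rw [reachB_fix grid limit (n : Int) hfix k] at hk'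
  exact reachB_mono grid limit (n : Int) hj hk'

-- one BFS expansion step gives reachability
lemma reach_nb (grid : List (List Int)) (limit w : Int) (k : Nat) (a b x y : Int)
    (hk : reachB grid limit w k a b = true)
    (hg : 0 ≤ x ∧ x < w ∧ 0 ≤ y ∧ y < w ∧ pvAt grid x y ≤ limit)
    (hadj : (a = x - 1 ∧ b = y) ∨ (a = x + 1 ∧ b = y) ∨ (a = x ∧ b = y - 1) ∨ (a = x ∧ b = y + 1)) :
    reachB grid limit w (k + 1) x y = true := by
  simp only [reachB, Bool.or_eq_true, Bool.and_eq_true, decide_eq_true_eq]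
  refine Or.inr ⟨hg, ?_⟩
  rcases hadj with ⟨ha, hb⟩ | ⟨ha, hb⟩ | ⟨ha, hb⟩ | ⟨ha, hb⟩ <;> subst ha <;> subst hb <;>
    simp only [hk, Bool.or_eq_true] <;> tauto

lemma reach_step (grid : List (List Int)) (limit w : Int) (c d : Int × Int) (hd : d ∈ pvDirs)
    (hc : ReachP grid limit w c) (hg : goodZ grid limit w (d.1 + c.1, d.2 + c.2)) :
    ReachP grid limit w (d.1 + c.1, d.2 + c.2) := by
  obtain ⟨k, hk⟩ := hc
  refine ⟨k + 1, ?_⟩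
  unfold goodZ at hg
  simp only [pvDirs, List.mem_cons, List.not_mem_nil, or_false] at hd
  rcases hd with rfl | rfl | rfl | rfl <;>
    refine reach_nb grid limit w k c.1 c.2 _ _ hk hg ?_
  · exact Or.inl ⟨by ring, by ring⟩
  · exact Or.inr (Or.inr (Or.inl ⟨by ring, by ring⟩))
  · exact Or.inr (Or.inl ⟨by ring, by ring⟩)
  · exact Or.inr (Or.inr (Or.inr ⟨by ring, by ring⟩))

-- ===== A-side loop invariant =====
def StOK (grid : List (List Int)) (limit w : Int)
    (st : List (Int × Int) × PySem.Set (Int × Int)) : Prop :=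
  (∀ e ∈ st.1, e ∈ st.2) ∧ (∀ e ∈ st.2, ReachP grid limit w e) ∧
  ((0, 0) : Int × Int) ∈ st.2 ∧ st.2.Nodup

def InvA (grid : List (List Int)) (limit w : Int)
    (q : List (Int × Int)) (visit : PySem.Set (Int × Int)) : Prop :=
  StOK grid limit w (q, visit) ∧
  ∀ a ∈ visit, a ∉ q → ∀ d ∈ pvDirs, goodZ grid limit w (d.1 + a.1, d.2 + a.2) →
    (d.1 + a.1, d.2 + a.2) ∈ visit

def Mid (grid : List (List Int)) (limit w : Int)
    (q0 : List (Int × Int)) (visit0 : PySem.Set (Int × Int))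
    (st : List (Int × Int) × PySem.Set (Int × Int)) : Prop :=
  StOK grid limit w st ∧ (∀ e ∈ q0, e ∈ st.1) ∧
  (∀ e ∈ st.2, e ∈ visit0 ∨ e ∈ st.1) ∧ (∀ e ∈ visit0, e ∈ st.2) ∧
  st.1.length + visit0.length = q0.length + st.2.length

lemma relax_one (grid : List (List Int)) (limit w : Int) (c d : Int × Int) (hd : d ∈ pvDirs)
    (hc : ReachP grid limit w c) (q0 : List (Int × Int)) (visit0 : PySem.Set (Int × Int))
    (st : List (Int × Int) × PySem.Set (Int × Int)) (h : Mid grid limit w q0 visit0 st) :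
    Mid grid limit w q0 visit0 (bfsRelax grid limit w c st d) ∧
    (∀ e ∈ st.2, e ∈ (bfsRelax grid limit w c st d).2) ∧
    (goodZ grid limit w (d.1 + c.1, d.2 + c.2) →
      (d.1 + c.1, d.2 + c.2) ∈ (bfsRelax grid limit w c st d).2) := by
  obtain ⟨⟨s1, s2, s3, s4⟩, m1, m2, m3, m4⟩ := h
  unfold bfsRelax
  by_cases hcond : d.1 + c.1 < 0 ∨ w ≤ d.1 + c.1 ∨ d.2 + c.2 < 0 ∨ w ≤ d.2 + c.2 ∨
      (d.1 + c.1, d.2 + c.2) ∈ st.2 ∨ limit < pvAt grid (d.1 + c.1) (d.2 + c.2)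
  · rw [if_pos hcond]
    refine ⟨⟨⟨s1, s2, s3, s4⟩, m1, m2, m3, m4⟩, fun e he => he, ?_⟩
    intro hg
    obtain ⟨g1, g2, g3, g4, g5⟩ := hg
    simp only at g1 g2 g3 g4 g5
    rcases hcond with hh | hh | hh | hh | hh | hh
    · omega
    · omega
    · omega
    · omega
    · exact hh
    · exact absurd g5 (not_le.mpr hh)
  · rw [if_neg hcond]
    simp only [not_or, not_lt, not_le] at hcond
    obtain ⟨n1, n2, n3, n4, n5, n6⟩ := hcond
    have hg : goodZ grid limit w (d.1 + c.1, d.2 + c.2) := ⟨n1, n2, n3, n4, n6⟩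
    have hnew : ReachP grid limit w (d.1 + c.1, d.2 + c.2) := reach_step grid limit w c d hd hc hg
    have hv' : PySem.Set.add st.2 (d.1 + c.1, d.2 + c.2) = st.2 ++ [(d.1 + c.1, d.2 + c.2)] :=
      PySem.Set.add_of_not_mem n5
    simp only [hv']
    refine ⟨⟨⟨?_, ?_, ?_, ?_⟩, ?_, ?_, ?_, ?_⟩, ?_, ?_⟩
    · intro e he
      rcases List.mem_append.mp he with he | he
      · exact List.mem_append_left _ (s1 e he)
      · exact List.mem_append_right _ he
    · intro e he
      rcases List.mem_append.mp he with he | he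
      · exact s2 e he
      · rw [List.mem_singleton.mp he]; exact hnew
    · exact List.mem_append_left _ s3
    · exact List.Nodup.append s4 (List.nodup_singleton _) (List.disjoint_singleton.mpr n5)
    · intro e he; exact List.mem_append_left _ (m1 e he)
    · intro e he
      rcases List.mem_append.mp he with he | he
      · rcases m2 e he with hh | hh
        · exact Or.inl hh
        · exact Or.inr (List.mem_append_left _ hh)
      · exact Or.inr (List.mem_append_right _ he)
    · intro e he; exact List.mem_append_left _ (m3 e he)
    · simp only [List.length_append, List.length_singleton]
      omega
    · intro e he; exact List.mem_append_left _ he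
    · intro _; exact List.mem_append_right _ (List.mem_singleton.mpr rfl)

lemma relax_fold (grid : List (List Int)) (limit w : Int) (c : Int × Int)
    (hc : ReachP grid limit w c) (q0 : List (Int × Int)) (visit0 : PySem.Set (Int × Int)) :
    ∀ (ds : List (Int × Int)), (∀ d ∈ ds, d ∈ pvDirs) →
    ∀ st, Mid grid limit w q0 visit0 st →
      Mid grid limit w q0 visit0 (ds.foldl (bfsRelax grid limit w c) st) ∧
      (∀ e ∈ st.2, e ∈ (ds.foldl (bfsRelax grid limit w c) st).2) ∧
      (∀ d ∈ ds, goodZ grid limit w (d.1 + c.1, d.2 + c.2) →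
        (d.1 + c.1, d.2 + c.2) ∈ (ds.foldl (bfsRelax grid limit w c) st).2) := by
  intro ds
  induction ds with
  | nil =>
    intro _ st h
    exact ⟨h, fun e he => he, by simp⟩
  | cons d ds ih =>
    intro hds st h
    have h1 := relax_one grid limit w c d (hds d (by simp)) hc q0 visit0 st h
    have h2 := ih (fun d' hd' => hds d' (by simp [hd'])) (bfsRelax grid limit w c st d) h1.1
    simp only [List.foldl_cons]
    refine ⟨h2.1, ?_, ?_⟩
    · intro e he
      exact h2.2.1 _ (h1.2.1 e he)
    · intro d' hd' hg
      rcases List.mem_cons.mp hd' with rfl | hd'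
      · exact h2.2.1 _ (h1.2.2 hg)
      · exact h2.2.2 d' hd' hg

lemma closed_complete (grid : List (List Int)) (limit w : Int)
    (visit : PySem.Set (Int × Int)) (h : InvA grid limit w [] visit) :
    ∀ e, e ∈ visit ↔ ReachP grid limit w e := by
  obtain ⟨⟨_, s2, s3, _⟩, hcl⟩ := h
  have aux : ∀ (k : Nat) (x y : Int), reachB grid limit w k x y = true →
      ((x, y) : Int × Int) ∈ visit := by
    intro k
    induction k with
    | zero =>
      intro x y hxy
      simp only [reachB, Bool.and_eq_true, beq_iff_eq] at hxy
      obtain ⟨rfl, rfl⟩ := hxy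
      exact s3
    | succ k ih =>
      intro x y hxy
      simp only [reachB, Bool.or_eq_true, Bool.and_eq_true, decide_eq_true_eq] at hxy
      rcases hxy with hxy | ⟨hg, hnb⟩
      · exact ih x y hxy
      · have hgood : goodZ grid limit w (x, y) := hg
        rcases hnb with ((h | h) | h) | h
        · have h' := hcl (x - 1, y) (ih _ _ h) (by simp) (1, 0) (by simp [pvDirs])
          simp only at h'
          rw [show (1 : Int) + (x - 1) = x from by ring, zero_add] at h'
          exact h' hgood
        · have h' := hcl (x + 1, y) (ih _ _ h) (by simp) (-1, 0) (by simp [pvDirs])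
          simp only at h'
          rw [show (-1 : Int) + (x + 1) = x from by ring, zero_add] at h'
          exact h' hgood
        · have h' := hcl (x, y - 1) (ih _ _ h) (by simp) (0, 1) (by simp [pvDirs])
          simp only at h'
          rw [show (1 : Int) + (y - 1) = y from by ring, zero_add] at h'
          exact h' hgood
        · have h' := hcl (x, y + 1) (ih _ _ h) (by simp) (0, -1) (by simp [pvDirs])
          simp only at h'
          rw [show (-1 : Int) + (y + 1) = y from by ring, zero_add] at h'
          exact h' hgood
  intro e
  constructor
  · exact s2 e
  · rintro ⟨k, hk⟩
    have := aux k e.1 e.2 hk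
    simpa using this

lemma visit_card (grid : List (List Int)) (limit : Int) (n : Nat) (hn : 0 < n)
    (visit : PySem.Set (Int × Int)) (h1 : visit.Nodup)
    (h2 : ∀ e ∈ visit, ReachP grid limit (n : Int) e) : visit.length ≤ n * n := by
  classical
  have hsub : visit.toFinset ⊆
      Finset.Icc (0 : Int) ((n : Int) - 1) ×ˢ Finset.Icc (0 : Int) ((n : Int) - 1) := by
    intro c hc
    rw [List.mem_toFinset] at hc
    obtain ⟨k, hk⟩ := h2 c hc
    obtain ⟨b1, b2, b3, b4⟩ := reachB_ir grid limit (n : Int) (by exact_mod_cast hn) k c.1 c.2 hk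
    simp only [Finset.mem_product, Finset.mem_Icc]
    omega
  have hcard := Finset.card_le_card hsub
  rw [List.toFinset_card_of_nodup h1, Finset.card_product] at hcard
  simp only [Int.card_Icc] at hcard
  have he : (((n : Int) - 1 + 1 - 0).toNat) = n := by omega
  rw [he] at hcard
  exact hcard

lemma loop_main (grid : List (List Int)) (limit : Int) (n : Nat) (hn : 0 < n) :
    ∀ (fuel : Nat) (q : List (Int × Int)) (visit : PySem.Set (Int × Int)),
      InvA grid limit (n : Int) q visit →
      q.length + 2 * (n * n - visit.length) ≤ fuel →
      ∀ e, e ∈ bfsLoop grid limit (n : Int) fuel q visit ↔ ReachP grid limit (n : Int) e := by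
  intro fuel
  induction fuel with
  | zero =>
    intro q visit hInv hF
    have hq0 : q.length = 0 := by omega
    have hq : q = [] := List.length_eq_zero_iff.mp hq0
    subst hq
    exact closed_complete grid limit (n : Int) visit hInv
  | succ fuel ih =>
    intro q visit hInv hF
    cases q with
    | nil => exact closed_complete grid limit (n : Int) visit hInv
    | cons c q =>
      obtain ⟨⟨s1, s2, s3, s4⟩, hcl⟩ := hInv
      have hc : ReachP grid limit (n : Int) c := s2 c (s1 c (by simp))
      have hMid : Mid grid limit (n : Int) q visit (q, visit) :=
        ⟨⟨fun e he => s1 e (by simp [he]), s2, s3, s4⟩, fun e he => he,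
          fun e he => Or.inl he, fun e he => he, rfl⟩
      have hFd := relax_fold grid limit (n : Int) c hc q visit pvDirs (fun d hd => hd)
        (q, visit) hMid
      obtain ⟨⟨⟨t1, t2, t3, t4⟩, n1, n2, n3, n4⟩, hmono, hdirs⟩ := hFd
      have hInv' : InvA grid limit (n : Int)
          (pvDirs.foldl (bfsRelax grid limit (n : Int) c) (q, visit)).1
          (pvDirs.foldl (bfsRelax grid limit (n : Int) c) (q, visit)).2 := by
        refine ⟨⟨t1, t2, t3, t4⟩, ?_⟩
        intro a ha hnq d hd hg
        rcases n2 a ha with hav | haq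
        · by_cases hac : a = c
          · subst hac
            exact hdirs d hd hg
          · have hanq : a ∉ c :: q := by
              intro hmem
              rcases List.mem_cons.mp hmem with hh | hh
              · exact hac hh
              · exact hnq (n1 a hh)
            exact hmono _ (hcl a hav hanq d hd hg)
        · exact absurd haq hnq
      have hlenv : visit.length ≤
          (pvDirs.foldl (bfsRelax grid limit (n : Int) c) (q, visit)).2.length := by
        have hsub : visit.toFinset ⊆
            (pvDirs.foldl (bfsRelax grid limit (n : Int) c) (q, visit)).2.toFinset := by
          intro a ha
          rw [List.mem_toFinset] at ha ⊢
          exact n3 a ha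
        calc visit.length = visit.toFinset.card := (List.toFinset_card_of_nodup s4).symm
          _ ≤ _ := Finset.card_le_card hsub
          _ = _ := List.toFinset_card_of_nodup t4
      have hcard := visit_card grid limit n hn _ t4 t2
      have hF' : (pvDirs.foldl (bfsRelax grid limit (n : Int) c) (q, visit)).1.length +
          2 * (n * n - (pvDirs.foldl (bfsRelax grid limit (n : Int) c) (q, visit)).2.length) ≤
          fuel := by
        simp only [List.length_cons] at hF
        omega
      have := ih _ _ hInv' hF'
      intro e
      rw [show bfsLoop grid limit (n : Int) (fuel + 1) (c :: q) visit =
        bfsLoop grid limit (n : Int) fuel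
          (pvDirs.foldl (bfsRelax grid limit (n : Int) c) (q, visit)).1
          (pvDirs.foldl (bfsRelax grid limit (n : Int) c) (q, visit)).2 from rfl]
      exact this e

-- ===== B-side lemmas =====
lemma reachB_oob (grid : List (List Int)) (limit w : Int) (hw : 0 < w) (k : Nat) (x y : Int)
    (h : ¬(0 ≤ x ∧ x < w ∧ 0 ≤ y ∧ y < w)) : reachB grid limit w k x y = false := by
  cases hr : reachB grid limit w k x y with
  | false => rfl
  | true =>
    obtain ⟨b1, b2, b3, b4⟩ := reachB_ir grid limit w hw k x y hr
    exact absurd ⟨b1, b2, b3, b4⟩ h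

lemma pvRG_map (f : Int → Int → Bool) (n x y : Int) (hx : 0 ≤ x) (hx' : x < n)
    (hy : 0 ≤ y) (hy' : y < n) :
    pvRG ((PySem.List.pyRange 0 n 1).map fun a => (PySem.List.pyRange 0 n 1).map fun b => f a b)
      x y = f x y := by
  unfold pvRG
  rw [PySem.List.pyGetD_map_pyRange_of_nonneg _ n x _ hx hx']
  rw [PySem.List.pyGetD_map_pyRange_of_nonneg _ n y _ hy hy']

lemma bInit_rg (n : Int) (x y : Int) (hx : 0 ≤ x) (hx' : x < n) (hy : 0 ≤ y) (hy' : y < n) :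
    pvRG (bInit n) x y = (x == 0 && y == 0) := by
  unfold bInit
  exact pvRG_map (fun a b => a == 0 && b == 0) n x y hx hx' hy hy'

lemma bStep_rg (grid : List (List Int)) (limit w : Int) (hw : 0 < w)
    (r : List (List Bool)) (j : Nat)
    (H : ∀ x y, 0 ≤ x → x < w → 0 ≤ y → y < w → pvRG r x y = reachB grid limit w j x y)
    (x y : Int) (hx : 0 ≤ x) (hx' : x < w) (hy : 0 ≤ y) (hy' : y < w) :
    pvRG (bStep grid limit w r) x y = reachB grid limit w (j + 1) x y := by
  unfold bStep
  rw [pvRG_map _ w x y hx hx' hy hy']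
  have e1 : (decide (0 < x) && pvRG r (x - 1) y) = reachB grid limit w j (x - 1) y := by
    by_cases h : 0 < x
    · rw [H (x - 1) y (by omega) (by omega) hy hy', decide_eq_true h, Bool.true_and]
    · rw [reachB_oob grid limit w hw j (x - 1) y (by omega), decide_eq_false h, Bool.false_and]
  have e2 : (decide (x + 1 < w) && pvRG r (x + 1) y) = reachB grid limit w j (x + 1) y := by
    by_cases h : x + 1 < w
    · rw [H (x + 1) y (by omega) h hy hy', decide_eq_true h, Bool.true_and]
    · rw [reachB_oob grid limit w hw j (x + 1) y (by omega), decide_eq_false h, Bool.false_and]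
  have e3 : (decide (0 < y) && pvRG r x (y - 1)) = reachB grid limit w j x (y - 1) := by
    by_cases h : 0 < y
    · rw [H x (y - 1) hx hx' (by omega) (by omega), decide_eq_true h, Bool.true_and]
    · rw [reachB_oob grid limit w hw j x (y - 1) (by omega), decide_eq_false h, Bool.false_and]
  have e4 : (decide (y + 1 < w) && pvRG r x (y + 1)) = reachB grid limit w j x (y + 1) := by
    by_cases h : y + 1 < w
    · rw [H x (y + 1) hx hx' (by omega) h, decide_eq_true h, Bool.true_and]
    · rw [reachB_oob grid limit w hw j x (y + 1) (by omega), decide_eq_false h, Bool.false_and]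
  have ed : decide (0 ≤ x ∧ x < w ∧ 0 ≤ y ∧ y < w ∧ pvAt grid x y ≤ limit)
      = decide (pvAt grid x y ≤ limit) := by
    by_cases h : pvAt grid x y ≤ limit <;> simp [hx, hx', hy, hy', h]
  simp only [reachB]
  rw [H x y hx hx' hy hy', e1, e2, e3, e4, ed]

lemma bLoop_rg (grid : List (List Int)) (limit w : Int) (hw : 0 < w) :
    ∀ (k : Nat) (r : List (List Bool)) (j : Nat),
      (∀ x y, 0 ≤ x → x < w → 0 ≤ y → y < w → pvRG r x y = reachB grid limit w j x y) →
      ∀ x y, 0 ≤ x → x < w → 0 ≤ y → y < w →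
        pvRG (bLoop grid limit w k r) x y = reachB grid limit w (j + k) x y := by
  intro k
  induction k with
  | zero =>
    intro r j H x y hx hx' hy hy'
    exact H x y hx hx' hy hy'
  | succ k ih =>
    intro r j H x y hx hx' hy hy'
    rw [show bLoop grid limit w (k + 1) r = if bStep grid limit w r = r then r
      else bLoop grid limit w k (bStep grid limit w r) from rfl]
    by_cases heq : bStep grid limit w r = r
    · rw [if_pos heq]
      have hfix : ∀ a b, reachB grid limit w (j + 1) a b = reachB grid limit w j a b := by
        intro a b
        by_cases hab : 0 ≤ a ∧ a < w ∧ 0 ≤ b ∧ b < w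
        · obtain ⟨h1, h2, h3, h4⟩ := hab
          rw [← bStep_rg grid limit w hw r j H a b h1 h2 h3 h4, heq, H a b h1 h2 h3 h4]
        · rw [reachB_oob grid limit w hw _ a b hab, reachB_oob grid limit w hw _ a b hab]
      rw [reachB_fix grid limit w hfix (k + 1) x y]
      exact H x y hx hx' hy hy'
    · rw [if_neg heq]
      have hstep : ∀ a b : Int, 0 ≤ a → a < w → 0 ≤ b → b < w →
          pvRG (bStep grid limit w r) a b = reachB grid limit w (j + 1) a b :=
        fun a b h1 h2 h3 h4 => bStep_rg grid limit w hw r j H a b h1 h2 h3 h4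
      have := ih (bStep grid limit w r) (j + 1) hstep x y hx hx' hy hy'
      rw [show j + 1 + k = j + (k + 1) from by omega] at this
      exact this

-- ===== VERDICT (by name: the statement is the Claim_ definition above) =====
theorem bfs_spec : Claim_equal_bfs := by
  unfold Claim_equal_bfs
  intro grid limit _hdom hpre
  unfold Spec_bfs
  obtain ⟨hne, _hrow0, _hdisj⟩ := hpre
  have hn : 0 < grid.length := List.length_pos_iff.mpr hne
  have hw : (0 : Int) < (grid.length : Int) := by exact_mod_cast hn
  unfold bfs bfs_alt
  by_cases hguard : limit < pvAt grid 0 0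
  · rw [if_pos hguard, if_pos hguard]
  · rw [if_neg hguard, if_neg hguard]
    have hof : PySem.Set.ofList [((0 : Int), (0 : Int))] = [((0 : Int), (0 : Int))] := rfl
    rw [hof]
    have hInv0 : InvA grid limit (grid.length : Int) [((0 : Int), (0 : Int))]
        [((0 : Int), (0 : Int))] := by
      refine ⟨⟨fun e he => he, ?_, by simp, List.nodup_singleton _⟩, ?_⟩
      · intro e he
        rw [List.mem_singleton.mp he]
        exact ⟨0, rfl⟩
      · intro a ha hnq
        exact absurd ha hnq
    have hmain := loop_main grid limit grid.length hn
      (2 * grid.length * grid.length + 1) [((0 : Int), (0 : Int))] [((0 : Int), (0 : Int))]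
      hInv0 (by
        simp only [List.length_singleton]
        rw [show 2 * grid.length * grid.length = 2 * (grid.length * grid.length) from by ring]
        have hnn := Nat.mul_pos hn hn
        omega)
    have hBinit : ∀ x y : Int, 0 ≤ x → x < (grid.length : Int) → 0 ≤ y →
        y < (grid.length : Int) →
        pvRG (bInit (grid.length : Int)) x y = reachB grid limit (grid.length : Int) 0 x y := by
      intro x y h1 h2 h3 h4
      rw [bInit_rg (grid.length : Int) x y h1 h2 h3 h4]
      rfl
    have hBloop := bLoop_rg grid limit (grid.length : Int) hw (grid.length * grid.length)
      (bInit (grid.length : Int)) 0 hBinit ((grid.length : Int) - 1) ((grid.length : Int) - 1)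
      (by omega) (by omega) (by omega) (by omega)
    rw [Nat.zero_add] at hBloop
    rw [hBloop]
    by_cases hm : (((grid.length : Int) - 1, (grid.length : Int) - 1) : Int × Int) ∈
        bfsLoop grid limit (grid.length : Int) (2 * grid.length * grid.length + 1)
          [((0 : Int), (0 : Int))] [((0 : Int), (0 : Int))]
    · have hreach := (hmain _).mp hm
      have hN := reach_to_N grid limit grid.length hn _ hreach
      rw [decide_eq_true hm]
      exact hN.symm
    · have hB : reachB grid limit (grid.length : Int) (grid.length * grid.length)
          ((grid.length : Int) - 1) ((grid.length : Int) - 1) = false := by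
        cases hr : reachB grid limit (grid.length : Int) (grid.length * grid.length)
            ((grid.length : Int) - 1) ((grid.length : Int) - 1) with
        | false => rfl
        | true => exact absurd ((hmain _).mpr ⟨_, hr⟩) hm
      rw [decide_eq_false hm, hB]
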